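-- pv_equiv track=rewrite | github.com/RamananVr/Leetcodepython | math_number_conversion/0660_remove_9.py | newInteger
-- ===== SOURCE A (Python) =====
-- def newInteger(n: int) -> int:
--     """
--     This function returns the nth integer in the sequence where all integers containing the digit '9' are removed.
--     """
--     result = 0
--     base = 1
--     while n > 0:
--         result += (n % 9) * base
--         n //= 9
--         base *= 10
--     return result
-- ===== SOURCE B (Python) =====
-- def newInteger(n: int) -> int:
--     # Two-pass: extract base-9 digits (LSB first), then reconstruct decimal by folding.
--     digits = []
--     while n > 0:
--         digits.append(n % 9)
--         n //= 9
--     result = 0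
--     for d in reversed(digits):
--         result = result * 10 + d
--     return result
-- ===== Notes on version B (the rewrite author's own statement) =====
-- stated objective: alternative
-- what changed: Splits A's fused accumulate-with-base loop into two passes: one loop extracting the base-9 digits into a list, then a separate fold over the reversed list reconstructing the decimal value digit by digit, with no base variable.
import Mathlib
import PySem

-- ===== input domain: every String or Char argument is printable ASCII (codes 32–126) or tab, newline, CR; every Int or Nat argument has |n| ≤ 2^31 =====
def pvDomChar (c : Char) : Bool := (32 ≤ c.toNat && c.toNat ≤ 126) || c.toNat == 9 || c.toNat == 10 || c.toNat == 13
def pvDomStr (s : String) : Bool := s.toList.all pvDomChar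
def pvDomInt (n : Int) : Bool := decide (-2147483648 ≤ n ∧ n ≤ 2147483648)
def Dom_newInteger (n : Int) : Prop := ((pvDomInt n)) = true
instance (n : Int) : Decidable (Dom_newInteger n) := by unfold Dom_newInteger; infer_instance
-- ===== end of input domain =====

-- B splits A's fused accumulate-with-base loop into two passes: digit extraction into a list, then a fold reconstructing the decimal value.


theorem pvFloordiv9_toNat_lt (n : Int) (h : n > 0) :
    (PySem.Int.floordiv n 9).toNat < n.toNat := by
  rw [PySem.Int.floordiv_eq_ediv_of_pos (by omega)]
  omega

-- ===== PORT A =====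
def newIntegerLoop (n result base : Int) : Int :=
  if h : n > 0 then
    newIntegerLoop (PySem.Int.floordiv n 9) (result + (PySem.Int.mod n 9) * base) (base * 10)
  else result
termination_by n.toNat
decreasing_by exact pvFloordiv9_toNat_lt n h

def newInteger (n : Int) : Int := newIntegerLoop n 0 1

-- ===== PORT B =====
def extractDigits (n : Int) : List Int :=
  if h : n > 0 then
    (PySem.Int.mod n 9) :: extractDigits (PySem.Int.floordiv n 9)
  else []
termination_by n.toNat
decreasing_by exact pvFloordiv9_toNat_lt n h

def newInteger_alt (n : Int) : Int :=
  (extractDigits n).reverse.foldl (fun r d => r * 10 + d) 0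

-- ===== PRECONDITION & SPEC =====
def Spec_newInteger (n : Int) (out : Int) : Prop := out = newInteger_alt n
instance (n : Int) (out : Int) : Decidable (Spec_newInteger n out) := by unfold Spec_newInteger; infer_instance

-- ===== CLAIM (what is proved, stated in full; the proofs are below) =====
def Claim_equal_newInteger : Prop := ∀ (n : Int), Dom_newInteger n → Spec_newInteger n (newInteger n)

-- ===== LEMMAS AND PROOFS =====

-- LSB-first value of a digit list.
def valLSB : List Int → Int
  | [] => 0
  | d :: ds => d + 10 * valLSB ds

theorem foldl_rev_eq_valLSB (l : List Int) (r : Int) :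
    l.reverse.foldl (fun r d => r * 10 + d) r = r * 10 ^ l.length + valLSB l := by
  induction l generalizing r with
  | nil => simp [valLSB]
  | cons d ds ih =>
    simp only [List.reverse_cons, List.foldl_append, List.foldl_cons, List.foldl_nil,
      valLSB, List.length_cons, ih]
    ring

theorem newIntegerLoop_eq (k : Nat) (n result base : Int) (hk : n.toNat ≤ k) :
    newIntegerLoop n result base = result + base * valLSB (extractDigits n) := by
  induction k generalizing n result base with
  | zero =>
    rw [newIntegerLoop, extractDigits]
    have h : ¬ n > 0 := by omega
    simp [h, valLSB]
  | succ k ih =>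
    rw [newIntegerLoop, extractDigits]
    by_cases h : n > 0
    · simp only [h, dite_true]
      rw [ih _ _ _ (by have := pvFloordiv9_toNat_lt n h; omega)]
      simp [valLSB]; ring
    · simp [h, valLSB]

-- ===== VERDICT (by name: the statement is the Claim_ definition above) =====
theorem newInteger_spec : Claim_equal_newInteger := by
  intro n _
  unfold Spec_newInteger newInteger newInteger_alt
  rw [newIntegerLoop_eq n.toNat n 0 1 le_rfl, foldl_rev_eq_valLSB]
  ring
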